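-- pv_equiv track=rewrite | github.com/madengfei/mojo_opset | mojo_opset/backends/ttx/kernels/ilu/fused_add_rmsnorm.py | rms_norm_fwd_heuristics
-- ===== SOURCE A (Python) =====
-- COL_BLOCKING_THRESHOLD = 2048
--
-- TOKEN_BLOCK_SIZE_TABLE = {
--     2048: 4,
--     1024: 8,
--     # NOTE: tl.arange range must be power-of-2 on some backends.
--     512: 16,
--     256: 16,
--     128: 32,
-- }
--
-- def rms_norm_fwd_heuristics(args):
--     hidden_dim = args.get("n_cols", args.get("N_COLS"))
--     if hidden_dim is None:
--         raise KeyError("n_cols")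
--     if hidden_dim <= COL_BLOCKING_THRESHOLD:
--         if hidden_dim in TOKEN_BLOCK_SIZE_TABLE:
--             return TOKEN_BLOCK_SIZE_TABLE[hidden_dim]
--
--         for dim_thresh, block_size in sorted(TOKEN_BLOCK_SIZE_TABLE.items()):
--             if hidden_dim <= dim_thresh:
--                 return block_size
--         return 1
--     else:
--         return 4
-- ===== SOURCE B (Python) =====
-- def rms_norm_fwd_heuristics(args):
--     hidden_dim = args.get("n_cols", args.get("N_COLS"))
--     if hidden_dim is None:
--         raise KeyError("n_cols")
--     # Bucket by ceil(log2) of the clamped dim: k = bit_length(max(dim-1, 127))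
--     # indexes a geometric bucket array; k > 10 means dim > 1024, which gets 4.
--     k = max(hidden_dim - 1, 127).bit_length()
--     if k > 10:
--         return 4
--     return (32, 16, 16, 8)[k - 7]
-- ===== Notes on version B (the rewrite author's own statement) =====
-- stated objective: alternative
-- what changed: Replaced the dict membership check plus sorted-items threshold scan with bit arithmetic: compute k = bit_length(max(dim-1,127)) (ceil log2 of the clamped dim) and index a 4-entry bucket tuple with k-7, returning 4 when k > 10; no dict, no sort, no comparison scan.
import Mathlib
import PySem

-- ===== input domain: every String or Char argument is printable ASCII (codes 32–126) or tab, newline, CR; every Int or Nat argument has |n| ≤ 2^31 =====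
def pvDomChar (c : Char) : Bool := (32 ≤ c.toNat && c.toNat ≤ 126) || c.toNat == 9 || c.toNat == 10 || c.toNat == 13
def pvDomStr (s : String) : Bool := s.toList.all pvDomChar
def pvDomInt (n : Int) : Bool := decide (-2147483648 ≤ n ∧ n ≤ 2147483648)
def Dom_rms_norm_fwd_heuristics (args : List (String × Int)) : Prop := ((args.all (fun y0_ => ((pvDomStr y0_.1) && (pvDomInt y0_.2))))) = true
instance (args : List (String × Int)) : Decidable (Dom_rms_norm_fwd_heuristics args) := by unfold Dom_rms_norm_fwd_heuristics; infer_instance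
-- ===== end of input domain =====

-- B buckets hidden_dim by bit_length (ceil log2) into a 4-entry array instead of A's dict lookup + sorted threshold scan; same values.


-- ===== PORT A =====
-- TOKEN_BLOCK_SIZE_TABLE, in its Python insertion order
def pvBlockTable : PySem.Dict Int Int :=
  PySem.Dict.ofList [(2048, 4), (1024, 8), (512, 16), (256, 16), (128, 32)]

-- 'for dim_thresh, block_size in …: if hidden_dim <= dim_thresh: return block_size' then 'return 1'
def pvLoopA : List (Int × Int) → Int → Int
  | [], _ => 1
  | (t, b) :: rest, hd => if hd ≤ t then b else pvLoopA rest hd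

def rms_norm_fwd_heuristics (args : List (String × Int)) : Int :=
  let d := PySem.Dict.mk args
  match (d.get? "n_cols").orElse (fun _ => d.get? "N_COLS") with
  | none => 0   -- raise KeyError("n_cols"): excluded by Pre_
  | some hd =>
    if hd ≤ 2048 then
      if pvBlockTable.contains hd then (pvBlockTable.get? hd).getD 0
      else
        -- sorted(table.items()): keys are distinct, so Python's tuple sort = sort by key
        pvLoopA (PySem.List.sorted pvBlockTable.items (fun p => p.1) false) hd
    else 4

-- ===== PORT B =====
-- the 4-entry bucket tuple (32, 16, 16, 8)
def pvBuckets : List Int := [32, 16, 16, 8]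

def rms_norm_fwd_heuristics_alt (args : List (String × Int)) : Int :=
  let d := PySem.Dict.mk args
  match (d.get? "n_cols").orElse (fun _ => d.get? "N_COLS") with
  | none => 0   -- raise KeyError("n_cols"): excluded by Pre_
  | some hd =>
    -- int.bit_length ported as Nat.size; exact here since max(hd-1,127) ≥ 127 ≥ 0
    let k : Int := ((max (hd - 1) 127).toNat.size : Int)
    if k > 10 then 4
    else (PySem.List.pyGet? pvBuckets (k - 7)).getD 0

-- ===== PRECONDITION & SPEC =====
-- A raises KeyError iff neither "n_cols" nor "N_COLS" is a key; B raises the same KeyError there.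
def Pre_rms_norm_fwd_heuristics (args : List (String × Int)) : Prop :=
  "n_cols" ∈ args.map (·.1) ∨ "N_COLS" ∈ args.map (·.1)
instance (args : List (String × Int)) : Decidable (Pre_rms_norm_fwd_heuristics args) := by
  unfold Pre_rms_norm_fwd_heuristics; infer_instance
def pvWitness_rms_norm_fwd_heuristics : (List (String × Int)) := [("n_cols", 256)]
def Spec_rms_norm_fwd_heuristics (args : List (String × Int)) (out : Int) : Prop := out = rms_norm_fwd_heuristics_alt args
instance (args : List (String × Int)) (out : Int) : Decidable (Spec_rms_norm_fwd_heuristics args out) := by unfold Spec_rms_norm_fwd_heuristics; infer_instance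

-- ===== CLAIM (what is proved, stated in full; the proofs are below) =====
def Claim_equal_rms_norm_fwd_heuristics : Prop := ∀ (args : List (String × Int)), Dom_rms_norm_fwd_heuristics args → Pre_rms_norm_fwd_heuristics args → Spec_rms_norm_fwd_heuristics args (rms_norm_fwd_heuristics args)

-- ===== LEMMAS AND PROOFS =====
theorem pvTableLit :
    pvBlockTable = PySem.Dict.mk [(2048, 4), (1024, 8), (512, 16), (256, 16), (128, 32)] := by
  decide

theorem pvSortedList :
    PySem.List.sorted [((2048:Int), (4:Int)), (1024, 8), (512, 16), (256, 16), (128, 32)] (fun p => p.1) false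
      = [(128, 32), (256, 16), (512, 16), (1024, 8), (2048, 4)] := by decide

theorem pvLoopA_eval (hd : Int) :
    pvLoopA [(128, 32), (256, 16), (512, 16), (1024, 8), (2048, 4)] hd
      = if hd ≤ 128 then 32 else if hd ≤ 256 then 16 else if hd ≤ 512 then 16
        else if hd ≤ 1024 then 8 else if hd ≤ 2048 then 4 else 1 := rfl

-- n in [2^k, 2^(k+1)) has bit length k+1
theorem pvSizeOf (n k : Nat) (h1 : 2 ^ k ≤ n) (h2 : n < 2 ^ (k + 1)) : n.size = k + 1 := by
  have hle : n.size ≤ k + 1 := Nat.size_le.mpr h2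
  have hlt : k < n.size := Nat.lt_size.mpr h1
  omega

-- B's bit-length bucket indexing collapses to the threshold ladder
theorem pvAltLadder (hd : Int) :
    (if ((((max (hd - 1) 127).toNat.size : Nat) : Int) > 10) then (4 : Int)
     else (PySem.List.pyGet? pvBuckets ((((max (hd - 1) 127).toNat.size : Nat) : Int) - 7)).getD 0)
      = if hd ≤ 128 then 32 else if hd ≤ 512 then 16 else if hd ≤ 1024 then 8 else 4 := by
  set m : Nat := (max (hd - 1) 127).toNat with hm
  by_cases h1 : hd ≤ 128
  · have hsz : m.size = 7 := by
      rw [show m = 127 from by simp only [hm]; omega]; decide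
    rw [hsz, if_neg (by norm_num), if_pos h1]; decide
  · by_cases h3 : hd ≤ 512
    · by_cases h2 : hd ≤ 256
      · have hsz : m.size = 8 := pvSizeOf m 7 (by simp only [hm]; omega) (by simp only [hm]; omega)
        rw [hsz, if_neg (by norm_num), if_neg h1, if_pos h3]; decide
      · have hsz : m.size = 9 := pvSizeOf m 8 (by simp only [hm]; omega) (by simp only [hm]; omega)
        rw [hsz, if_neg (by norm_num), if_neg h1, if_pos h3]; decide
    · by_cases h4 : hd ≤ 1024
      · have hsz : m.size = 10 := pvSizeOf m 9 (by simp only [hm]; omega) (by simp only [hm]; omega)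
        rw [hsz, if_neg (by norm_num), if_neg h1, if_neg h3, if_pos h4]; decide
      · have hsz : 10 < m.size := Nat.lt_size.mpr (by simp only [hm]; omega)
        rw [if_pos (by exact_mod_cast hsz), if_neg h1, if_neg h3, if_neg h4]

-- ===== VERDICT (by name: the statement is the Claim_ definition above) =====
theorem rms_norm_fwd_heuristics_spec : Claim_equal_rms_norm_fwd_heuristics := by
  intro args _ _
  unfold Spec_rms_norm_fwd_heuristics rms_norm_fwd_heuristics rms_norm_fwd_heuristics_alt
  cases h : ((PySem.Dict.mk args).get? "n_cols").orElse (fun _ => (PySem.Dict.mk args).get? "N_COLS") with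
  | none => simp only [h]
  | some hd =>
    simp only [h, pvAltLadder, pvTableLit, PySem.Dict.contains_mk,
      PySem.Dict.get?_mk_cons, List.any_cons, List.any_nil, Bool.or_eq_true,
      Bool.or_false, beq_iff_eq]
    split_ifs <;>
      (try simp only [pvSortedList, pvLoopA_eval, Option.getD_some]) <;>
      (try split_ifs) <;> omega
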